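-- pv_equiv track=rewrite | github.com/Nuthouse01/PMX-VMD-Scripting-Tools | mmd_scripting/core/translation_functions.py | _packetize_translate_requests
-- ===== SOURCE A (Python) =====
-- from typing import TypeVar, List, Tuple, Dict
--
-- TRANSLATE_MAX_LINES_PER_REQUEST = 15
--
-- def _packetize_translate_requests(jp_list: List[str]) -> List[str]:
-- 	"""
-- 	Group/join a massive list of items to translate into fewer requests which each contain many separated by newlines.
-- 	options: TRANSLATE_MAX_LINES_PER_REQUEST.
--
-- 	:param jp_list: list of each JP name, names must not include newlines
-- 	:return: list of combined names, which are many JP names joined by newlines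
-- 	"""
-- 	retme = []
-- 	start_idx = 0
-- 	while start_idx < len(jp_list):
-- 		sub_list = jp_list[start_idx : start_idx+TRANSLATE_MAX_LINES_PER_REQUEST]
-- 		bigstr = "\n".join(sub_list)
-- 		retme.append(bigstr)
-- 		start_idx += TRANSLATE_MAX_LINES_PER_REQUEST
-- 	return retme
-- ===== SOURCE B (Python) =====
-- TRANSLATE_MAX_LINES_PER_REQUEST = 15
--
-- def _packetize_translate_requests(jp_list):
--     retme = []
--     buf = []
--     for name in jp_list:
--         buf.append(name)
--         if len(buf) == TRANSLATE_MAX_LINES_PER_REQUEST: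
--             retme.append("\n".join(buf))
--             buf = []
--     if buf:
--         retme.append("\n".join(buf))
--     return retme
-- ===== Notes on version B (the rewrite author's own statement) =====
-- stated objective: alternative
-- what changed: Replaces A's index-arithmetic while loop that slices fixed windows jp_list[i:i+15] with a single element-by-element pass maintaining a running buffer that is joined and flushed whenever it reaches 15 names (plus a final flush).
import Mathlib
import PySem

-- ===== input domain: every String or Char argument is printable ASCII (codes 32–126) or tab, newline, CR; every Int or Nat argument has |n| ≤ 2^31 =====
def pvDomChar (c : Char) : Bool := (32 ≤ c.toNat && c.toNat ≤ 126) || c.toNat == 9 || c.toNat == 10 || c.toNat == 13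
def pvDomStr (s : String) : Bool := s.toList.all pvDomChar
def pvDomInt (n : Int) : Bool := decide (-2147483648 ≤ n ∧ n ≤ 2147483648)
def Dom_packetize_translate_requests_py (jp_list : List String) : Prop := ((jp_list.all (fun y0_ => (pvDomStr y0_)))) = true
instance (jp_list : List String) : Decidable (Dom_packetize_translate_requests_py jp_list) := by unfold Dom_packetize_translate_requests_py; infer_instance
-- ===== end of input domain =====

-- B replaces A's fixed-window index slicing with a one-pass running buffer flushed at 15 names; same O(n) cost, different decomposition.

-- ===== PORT A =====
-- while start_idx < len(jp_list): slice, join, append, start_idx += 15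
def pvAloop (jp_list retme : List String) (start_idx : Nat) : List String :=
  if start_idx < jp_list.length then
    let sub_list := PySem.List.slice jp_list (some (start_idx : Int)) (some ((start_idx + 15 : Nat) : Int))
    let bigstr := PySem.Str.join "\n" sub_list
    pvAloop jp_list (retme ++ [bigstr]) (start_idx + 15)
  else retme
termination_by jp_list.length - start_idx
decreasing_by omega

def packetize_translate_requests_py (jp_list : List String) : List String :=
  pvAloop jp_list [] 0

-- ===== PORT B =====
-- fold step of Source B's for-loop: state = (retme, buf)
def pvBstep (st : List String × List String) (name : String) : List String × List String :=
  let buf := st.2 ++ [name]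
  if buf.length = 15 then (st.1 ++ [PySem.Str.join "\n" buf], [])
  else (st.1, buf)

def packetize_translate_requests_py_alt (jp_list : List String) : List String :=
  let st := jp_list.foldl pvBstep ([], [])
  if st.2 = [] then st.1 else st.1 ++ [PySem.Str.join "\n" st.2]

-- ===== PRECONDITION & SPEC =====
def Spec_packetize_translate_requests_py (jp_list : List String) (out : List String) : Prop := out = packetize_translate_requests_py_alt jp_list
instance (jp_list : List String) (out : List String) : Decidable (Spec_packetize_translate_requests_py jp_list out) := by unfold Spec_packetize_translate_requests_py; infer_instance

-- ===== CLAIM (what is proved, stated in full; the proofs are below) =====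
def Claim_equal_packetize_translate_requests_py : Prop := ∀ (jp_list : List String), Dom_packetize_translate_requests_py jp_list → Spec_packetize_translate_requests_py jp_list (packetize_translate_requests_py jp_list)

-- ===== LEMMAS AND PROOFS =====

-- common specification: chunk the list into groups of 15 and join each with newlines
def pvChunks : List String → List String
  | [] => []
  | x :: xs => PySem.Str.join "\n" ((x :: xs).take 15) :: pvChunks ((x :: xs).drop 15)
termination_by l => l.length
decreasing_by simp

theorem pvChunks_nil : pvChunks [] = [] := by rw [pvChunks.eq_def]

theorem pvChunks_ne_nil (l : List String) (h : l ≠ []) :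
    pvChunks l = PySem.Str.join "\n" (l.take 15) :: pvChunks (l.drop 15) := by
  cases l with
  | nil => exact absurd rfl h
  | cons x xs => rw [pvChunks.eq_def]

theorem pvAloop_eq_chunks : ∀ (n : Nat) (l retme : List String) (start : Nat),
    l.length - start ≤ n → pvAloop l retme start = retme ++ pvChunks (l.drop start) := by
  intro n
  induction n with
  | zero =>
    intro l retme start h
    have hge : l.length ≤ start := by omega
    rw [pvAloop]
    simp [Nat.not_lt_of_le hge, List.drop_eq_nil_of_le hge, pvChunks_nil]
  | succ n ih =>
    intro l retme start h
    rw [pvAloop]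
    by_cases hlt : start < l.length
    · simp only [hlt, if_true]
      rw [ih l _ (start + 15) (by omega)]
      have hslice : PySem.List.slice l (some (start : Int)) (some ((start + 15 : Nat) : Int))
          = (l.drop start).take 15 := by
        rw [PySem.List.slice_natCast, Nat.add_sub_cancel_left]
      have hne : l.drop start ≠ [] := by
        intro hnil
        have := List.drop_eq_nil_iff.mp hnil
        omega
      have hdd : (l.drop start).drop 15 = l.drop (start + 15) := by
        rw [List.drop_drop, Nat.add_comm]
      rw [pvChunks_ne_nil _ hne, hslice, hdd]
      simp
    · simp only [hlt, if_false]
      have hge : l.length ≤ start := by omega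
      simp [List.drop_eq_nil_of_le hge, pvChunks_nil]

theorem pvBfold_eq_chunks : ∀ (l buf acc : List String), buf.length < 15 →
    (let st := l.foldl pvBstep (acc, buf)
     if st.2 = [] then st.1 else st.1 ++ [PySem.Str.join "\n" st.2])
    = acc ++ pvChunks (buf ++ l) := by
  intro l
  induction l with
  | nil =>
    intro buf acc hlen
    simp only [List.foldl_nil, List.append_nil]
    cases buf with
    | nil => simp [pvChunks_nil]
    | cons b bs =>
      have hb : (b :: bs).length ≤ 15 := by
        simp only [List.length_cons] at hlen ⊢; omega
      have h1 : (b :: bs).take 15 = b :: bs := List.take_of_length_le hb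
      have h2 : (b :: bs).drop 15 = [] := List.drop_eq_nil_of_le hb
      rw [pvChunks_ne_nil _ (by simp), h1, h2, pvChunks_nil]
      simp
  | cons x xs ih =>
    intro buf acc hlen
    simp only [List.foldl_cons]
    by_cases hfull : (buf ++ [x]).length = 15
    · have hstep : pvBstep (acc, buf) x = (acc ++ [PySem.Str.join "\n" (buf ++ [x])], []) := by
        simp [pvBstep, hfull]
      rw [hstep, ih [] _ (by simp)]
      have hbx : buf ++ x :: xs = (buf ++ [x]) ++ xs := by simp
      have h1 : (buf ++ x :: xs).take 15 = buf ++ [x] := by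
        rw [hbx, List.take_append_of_le_length (by omega), List.take_of_length_le (by omega)]
      have h2 : (buf ++ x :: xs).drop 15 = xs := by
        rw [hbx, List.drop_append_of_le_length (by omega)]
        simp [List.drop_eq_nil_of_le, hfull]
      rw [pvChunks_ne_nil (buf ++ x :: xs) (by simp), h1, h2]
      simp
    · have h15 : (buf ++ [x]).length = buf.length + 1 := by simp
      have hne14 : ¬ buf.length = 14 := by omega
      have hstep : pvBstep (acc, buf) x = (acc, buf ++ [x]) := by
        simp [pvBstep, hne14]
      have hlen' : (buf ++ [x]).length < 15 := by omega
      rw [hstep, ih (buf ++ [x]) acc hlen']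
      simp

-- ===== VERDICT (by name: the statement is the Claim_ definition above) =====
theorem packetize_translate_requests_py_spec : Claim_equal_packetize_translate_requests_py := by
  intro jp_list _
  unfold Spec_packetize_translate_requests_py packetize_translate_requests_py packetize_translate_requests_py_alt
  rw [pvAloop_eq_chunks jp_list.length jp_list [] 0 (by omega)]
  have := pvBfold_eq_chunks jp_list [] [] (by simp)
  simpa using this.symm
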